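-- pv_equiv track=rewrite | github.com/Karlhsiao/APCS-practice | Python/string_decoding.py | revert_string
-- ===== SOURCE A (Python) =====
-- def revert_string(string, number):
--     numlist = []
--     strlist = []
--     ans = []
--     ansstring = ""
--
--     for i in number:
--         numlist.append(i)
--
--     for i in string:
--         strlist.append(i)
--
--     numlist.reverse()
--     strlist.reverse()
--
--     for i in range(len(numlist)):
--         if numlist[i] == "0":
--             ans.append(strlist[i])
--
--         elif numlist[i] == "1":
--             ans.insert(0, strlist[i])
--
--     ans.reverse()
--
--     for i in ans:
--         ansstring += i
--
--     return ansstring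
-- ===== SOURCE B (Python) =====
-- def revert_string(string, number):
--     rnum = number[::-1]
--     rstr = string[::-1]
--     zeros = []
--     ones = []
--     for i in range(len(rnum)):
--         if rnum[i] == "0":
--             zeros.append(rstr[i])
--         elif rnum[i] == "1":
--             ones.append(rstr[i])
--     return "".join(zeros[::-1] + ones)
-- ===== Notes on version B (the rewrite author's own statement) =====
-- stated objective: simpler
-- what changed: B drops the single mutable list with positional front-inserts and the final whole-list reverse: it collects '0'-chars and '1'-chars into two separate lists in one pass and returns ''.join(zeros[::-1] + ones).
import Mathlib
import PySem

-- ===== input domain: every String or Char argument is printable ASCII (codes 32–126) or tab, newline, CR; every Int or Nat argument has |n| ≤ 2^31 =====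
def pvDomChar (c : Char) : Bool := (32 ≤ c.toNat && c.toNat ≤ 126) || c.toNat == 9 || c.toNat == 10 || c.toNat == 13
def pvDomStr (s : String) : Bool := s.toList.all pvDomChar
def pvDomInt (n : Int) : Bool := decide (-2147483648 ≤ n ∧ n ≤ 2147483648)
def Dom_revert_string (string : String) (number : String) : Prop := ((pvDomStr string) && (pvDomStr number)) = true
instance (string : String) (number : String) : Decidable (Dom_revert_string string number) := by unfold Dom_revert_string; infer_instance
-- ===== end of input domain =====

-- B changes the decomposition (two collections instead of positional front-inserts); equivalence is on the return value.

-- ===== PORT A =====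
-- literal transliteration of A; str indexing strlist[i]/numlist[i] raises in Python on
-- out-of-range i — those inputs are excluded by Pre_ below, pyGetD's default is never the result there
def revert_string (string : String) (number : String) : String :=
  let numlist : List Char := number.toList.foldl (fun acc c => acc ++ [c]) []
  let strlist : List Char := string.toList.foldl (fun acc c => acc ++ [c]) []
  let numlist := numlist.reverse
  let strlist := strlist.reverse
  let ans : List Char :=
    (PySem.List.pyRange 0 (numlist.length : Int) 1).foldl
      (fun ans i =>
        if PySem.List.pyGetD numlist i '?' = '0' then
          ans ++ [PySem.List.pyGetD strlist i '?']
        else if PySem.List.pyGetD numlist i '?' = '1' then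
          PySem.List.pyGetD strlist i '?' :: ans
        else ans) []
  let ans := ans.reverse
  String.ofList (ans.foldl (fun acc c => acc ++ [c]) [])

-- ===== PORT B =====
-- literal transliteration of Source B: s[::-1] ported as list reverse; two collections zeros/ones
def revert_string_alt (string : String) (number : String) : String :=
  let rnum : List Char := number.toList.reverse
  let rstr : List Char := string.toList.reverse
  let zo : List Char × List Char :=
    (PySem.List.pyRange 0 (rnum.length : Int) 1).foldl
      (fun zo i =>
        if PySem.List.pyGetD rnum i '?' = '0' then
          (zo.1 ++ [PySem.List.pyGetD rstr i '?'], zo.2)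
        else if PySem.List.pyGetD rnum i '?' = '1' then
          (zo.1, zo.2 ++ [PySem.List.pyGetD rstr i '?'])
        else zo) ([], [])
  String.ofList (zo.1.reverse ++ zo.2)

-- ===== PRECONDITION & SPEC =====
-- Pre_ excludes exactly the inputs on which Python A raises IndexError: when number is longer
-- than string, each of the first (len number - len string) bits of number would be read at a
-- reversed index past the end of string iff it is '0' or '1'.
def Pre_revert_string (string : String) (number : String) : Prop :=
  ((number.toList.take (number.toList.length - string.toList.length)).all
    (fun c => !(c == '0') && !(c == '1'))) = true
instance (string : String) (number : String) : Decidable (Pre_revert_string string number) := by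
  unfold Pre_revert_string; infer_instance
def pvWitness_revert_string : String × String := ("ab", "01")
def Spec_revert_string (string : String) (number : String) (out : String) : Prop := out = revert_string_alt string number
instance (string : String) (number : String) (out : String) : Decidable (Spec_revert_string string number out) := by unfold Spec_revert_string; infer_instance

-- ===== CLAIM (what is proved, stated in full; the proofs are below) =====
def Claim_equal_revert_string : Prop := ∀ (string : String) (number : String), Dom_revert_string string number → Pre_revert_string string number → Spec_revert_string string number (revert_string string number)

-- ===== LEMMAS AND PROOFS =====

-- the two loops, run over the same index list, are related by the invariant
-- ans = ones.reverse ++ zeros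
theorem revert_loops_rel (rn rs : List Char) (idxs : List Int) :
    ∀ (zeros ones : List Char),
      (idxs.foldl
        (fun ans i =>
          if PySem.List.pyGetD rn i '?' = '0' then
            ans ++ [PySem.List.pyGetD rs i '?']
          else if PySem.List.pyGetD rn i '?' = '1' then
            PySem.List.pyGetD rs i '?' :: ans
          else ans) (ones.reverse ++ zeros)) =
      (let zo := idxs.foldl
        (fun zo i =>
          if PySem.List.pyGetD rn i '?' = '0' then
            (zo.1 ++ [PySem.List.pyGetD rs i '?'], zo.2)
          else if PySem.List.pyGetD rn i '?' = '1' then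
            (zo.1, zo.2 ++ [PySem.List.pyGetD rs i '?'])
          else zo) (zeros, ones);
       zo.2.reverse ++ zo.1) := by
  induction idxs with
  | nil => intro zeros ones; simp
  | cons i idxs ih =>
    intro zeros ones
    by_cases h0 : PySem.List.pyGetD rn i '?' = '0'
    · simpa [h0, List.append_assoc] using ih (zeros ++ [PySem.List.pyGetD rs i '?']) ones
    · by_cases h1 : PySem.List.pyGetD rn i '?' = '1'
      · simpa [h0, h1] using ih zeros (ones ++ [PySem.List.pyGetD rs i '?'])
      · simpa [h0, h1] using ih zeros ones

-- ===== VERDICT (by name: the statement is the Claim_ definition above) =====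
theorem revert_string_spec : Claim_equal_revert_string := by
  intro string number _ _
  unfold Spec_revert_string revert_string revert_string_alt
  simp only [PySem.List.foldl_append_singleton, List.nil_append]
  have := revert_loops_rel number.toList.reverse string.toList.reverse
    (PySem.List.pyRange 0 (number.toList.reverse.length : Int) 1) [] []
  simp only [List.reverse_nil, List.nil_append] at this
  rw [this]
  simp [List.reverse_append]
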